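-- pv_equiv track=rewrite | github.com/hackathon292-crypto/Unbiased-Ai-Decision | backend/utils/dataset_analyzer.py | _infer_domain_from_name
-- ===== SOURCE A (Python) =====
-- from typing import Any, Dict, List, Optional, Tuple
--
-- DOMAIN_SIGNATURES: Dict[str, Dict[str, List[str]]] = {
--     "hiring": {
--         "required": [
--             "years_experience",
--             "education_level",
--             "technical_score",
--             "communication_score",
--         ],
--         "optional": ["num_past_jobs", "certifications"],
--         "target_candidates": ["label", "target", "ground_truth", "hired", "decision", "outcome"],
--     },
--     "loan": {
--         "required": [
--             "credit_score",
--             "annual_income",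
--             "loan_amount",
--             "loan_term_months",
--         ],
--         "optional": ["employment_years", "existing_debt", "num_credit_lines"],
--         "target_candidates": ["label", "target", "ground_truth", "approved", "loan_approved", "decision", "outcome"],
--     },
--     "social": {
--         "required": [
--             "avg_session_minutes",
--             "topics_interacted",
--             "like_rate",
--             "share_rate",
--         ],
--         "optional": ["posts_per_day", "comment_rate", "account_age_days"],
--         "target_candidates": [
--             "label",
--             "target",
--             "ground_truth",
--             "recommended_category_id",
--             "recommended_category",
--             "category",
--             "engagement_label",
--         ],
--     },
-- }
--
-- def _infer_domain_from_name(name: Optional[str]) -> Optional[str]: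
--     lowered = (name or "").lower()
--     for domain in DOMAIN_SIGNATURES:
--         if domain in lowered:
--             return domain
--     if "hire" in lowered:
--         return "hiring"
--     if "loan" in lowered or "credit" in lowered:
--         return "loan"
--     if "social" in lowered or "recommend" in lowered:
--         return "social"
--     return None
-- ===== SOURCE B (Python) =====
-- _KEYWORDS = [
--     ("hiring", "hiring"),
--     ("loan", "loan"),
--     ("social", "social"),
--     ("hire", "hiring"),
--     ("credit", "loan"),
--     ("recommend", "social"),
-- ]
--
-- def _infer_domain_from_name(name):
--     lowered = (name or "").lower()
--     # Phase 1: one left-to-right scan over the string, collecting every keyword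
--     # that occurs anywhere (checked by "does it start at this position?").
--     found = set()
--     for i in range(len(lowered)):
--         for kw, _ in _KEYWORDS:
--             if lowered.startswith(kw, i):
--                 found.add(kw)
--     # Phase 2: resolve the collected matches by priority.
--     for kw, domain in _KEYWORDS:
--         if kw in found:
--             return domain
--     return None
-- ===== Notes on version B (the rewrite author's own statement) =====
-- stated objective: alternative
-- what changed: Instead of running six ordered substring searches with early return, B makes one left-to-right scan over the string positions collecting the set of all keywords that match anywhere, and then resolves that set by a separate priority pass; same lowercase+priority semantics, different traversal (positions-first instead of keywords-first).
import Mathlib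
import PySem

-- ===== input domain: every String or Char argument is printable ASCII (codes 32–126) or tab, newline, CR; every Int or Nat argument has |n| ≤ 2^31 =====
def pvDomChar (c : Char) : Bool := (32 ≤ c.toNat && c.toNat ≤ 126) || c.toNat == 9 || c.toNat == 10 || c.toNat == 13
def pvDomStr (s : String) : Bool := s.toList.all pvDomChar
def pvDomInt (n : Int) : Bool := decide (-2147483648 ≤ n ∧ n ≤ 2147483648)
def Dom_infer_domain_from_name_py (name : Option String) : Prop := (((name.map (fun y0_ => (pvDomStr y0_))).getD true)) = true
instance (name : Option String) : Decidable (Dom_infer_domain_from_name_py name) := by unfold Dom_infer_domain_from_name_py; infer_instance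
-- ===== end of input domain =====

-- B replaces A's six ordered substring searches by one position scan collecting the set of all keyword hits, then a separate priority-resolution pass (alternative structure, same cost class).


-- ===== PORT A =====
-- Port of A: loop over the DOMAIN_SIGNATURES keys, then the OR'd if-chain.
def infer_domain_from_name_py (name : Option String) : Option String :=
  let lowered := PySem.Str.lower (name.getD "")
  match ["hiring", "loan", "social"].find? (fun d => PySem.Str.isIn d lowered) with
  | some d => some d
  | none =>
    if PySem.Str.isIn "hire" lowered then some "hiring"
    else if PySem.Str.isIn "loan" lowered || PySem.Str.isIn "credit" lowered then some "loan"
    else if PySem.Str.isIn "social" lowered || PySem.Str.isIn "recommend" lowered then some "social"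
    else none

-- ===== PORT B =====
-- Port of B: the ordered (keyword, domain) table.
def kwTable : List (String × String) :=
  [("hiring", "hiring"), ("loan", "loan"), ("social", "social"),
   ("hire", "hiring"), ("credit", "loan"), ("recommend", "social")]

-- B's phase-1 nested loop: for i in range(len(lowered)): for kw,_ in _KEYWORDS: if lowered.startswith(kw, i): found.add(kw)
-- 'lowered.startswith(kw, i)' for 0 ≤ i < len(lowered) is exactly 'kw.toList <+: lowered.drop i'.
def scanFound (lowered : List Char) : PySem.Set String :=
  (List.range lowered.length).foldl
    (fun s i => kwTable.foldl
      (fun s p => if p.1.toList.isPrefixOf (lowered.drop i) then PySem.Set.add s p.1 else s) s)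
    PySem.Set.empty

def infer_domain_from_name_py_alt (name : Option String) : Option String :=
  let lowered := PySem.Str.lower (name.getD "")
  let found := scanFound lowered.toList
  (kwTable.find? (fun p => PySem.Set.contains found p.1)).map Prod.snd

-- ===== PRECONDITION & SPEC =====
def Spec_infer_domain_from_name_py (name : Option String) (out : Option String) : Prop := out = infer_domain_from_name_py_alt name
instance (name : Option String) (out : Option String) : Decidable (Spec_infer_domain_from_name_py name out) := by unfold Spec_infer_domain_from_name_py; infer_instance

-- ===== CLAIM (what is proved, stated in full; the proofs are below) =====
def Claim_equal_infer_domain_from_name_py : Prop := ∀ (name : Option String), Dom_infer_domain_from_name_py name → Spec_infer_domain_from_name_py name (infer_domain_from_name_py name)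

-- ===== LEMMAS AND PROOFS =====

-- membership in the inner fold (one position, all keywords)
theorem mem_inner_fold (l : List (String × String)) (cond : String × String → Bool) (s : PySem.Set String) (x : String) :
    x ∈ l.foldl (fun s p => if cond p then PySem.Set.add s p.1 else s) s ↔
      x ∈ s ∨ ∃ p ∈ l, cond p ∧ p.1 = x := by
  induction l generalizing s with
  | nil => simp
  | cons p t ih =>
    simp only [List.foldl_cons]
    rw [ih]
    by_cases h : cond p = true
    · rw [if_pos h]
      simp only [PySem.Set.mem_add, List.mem_cons]
      constructor
      · rintro (⟨hs | he⟩ | ⟨q, hq, hc, he⟩)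
        · exact Or.inl hs
        · exact Or.inr ⟨p, Or.inl rfl, h, he.symm⟩
        · exact Or.inr ⟨q, Or.inr hq, hc, he⟩
      · rintro (hs | ⟨q, hq, hc, he⟩)
        · exact Or.inl (Or.inl hs)
        · rcases hq with rfl | hq
          · exact Or.inl (Or.inr he.symm)
          · exact Or.inr ⟨q, hq, hc, he⟩
    · rw [if_neg h]
      constructor
      · rintro (hs | ⟨q, hq, hc, he⟩)
        · exact Or.inl hs
        · exact Or.inr ⟨q, List.mem_cons_of_mem _ hq, hc, he⟩
      · rintro (hs | ⟨q, hq, hc, he⟩)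
        · exact Or.inl hs
        · rcases List.mem_cons.mp hq with rfl | hq'
          · exact absurd hc h
          · exact Or.inr ⟨q, hq', hc, he⟩

-- membership in the outer fold (all positions)
theorem mem_scan_fold (idxs : List Nat) (lowered : List Char) (s : PySem.Set String) (x : String) :
    x ∈ idxs.foldl
        (fun s i => kwTable.foldl
          (fun s p => if p.1.toList.isPrefixOf (lowered.drop i) then PySem.Set.add s p.1 else s) s) s ↔
      x ∈ s ∨ ∃ i ∈ idxs, ∃ p ∈ kwTable, p.1.toList.isPrefixOf (lowered.drop i) ∧ p.1 = x := by
  induction idxs generalizing s with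
  | nil => simp
  | cons i t ih =>
    simp only [List.foldl_cons]
    rw [ih, mem_inner_fold kwTable (fun p => p.1.toList.isPrefixOf (lowered.drop i))]
    constructor
    · rintro ((hs | ⟨p, hp, hc, he⟩) | ⟨j, hj, p, hp, hc, he⟩)
      · exact Or.inl hs
      · exact Or.inr ⟨i, List.mem_cons_self, p, hp, hc, he⟩
      · exact Or.inr ⟨j, List.mem_cons_of_mem _ hj, p, hp, hc, he⟩
    · rintro (hs | ⟨j, hj, p, hp, hc, he⟩)
      · exact Or.inl (Or.inl hs)
      · rcases List.mem_cons.mp hj with rfl | hj'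
        · exact Or.inl (Or.inr ⟨p, hp, hc, he⟩)
        · exact Or.inr ⟨j, hj', p, hp, hc, he⟩

-- contains on the collected set equals Python's substring test, for any nonempty keyword of the table
theorem contains_scanFound (lowered : String) (kw : String)
    (hmem : kw ∈ kwTable.map Prod.fst) (hne : kw.toList ≠ []) :
    PySem.Set.contains (scanFound lowered.toList) kw = PySem.Str.isIn kw lowered := by
  rcases h : PySem.Str.isIn kw lowered with _ | _
  · have hch : PySem.Chars.isIn kw.toList lowered.toList = false := by
      rw [← PySem.Str.isIn_eq]; exact h
    rw [Bool.eq_false_iff]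
    intro hc
    have hx := (PySem.Set.contains_iff _ _).mp hc
    unfold scanFound at hx
    rw [mem_scan_fold] at hx
    rcases hx with hx | ⟨i, _, p, _, hc', he⟩
    · exact absurd hx (by simp [PySem.Set.empty])
    · have hpp : p.1.toList <+: lowered.toList.drop i := List.isPrefixOf_iff_prefix.mp hc'
      rw [he] at hpp
      have := (PySem.Chars.exists_prefix_drop_iff_isIn _ _).mp ⟨i, hpp⟩
      rw [hch] at this
      exact Bool.false_ne_true this
  · have hch : PySem.Chars.isIn kw.toList lowered.toList = true := by
      rw [← PySem.Str.isIn_eq]; exact h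
    obtain ⟨j, hjp⟩ := (PySem.Chars.exists_prefix_drop_iff_isIn _ _).mpr hch
    have hjlt : j < lowered.toList.length := by
      by_contra hge
      push Not at hge
      rw [List.drop_eq_nil_of_le hge] at hjp
      exact hne (List.prefix_nil.mp hjp)
    rcases List.mem_map.mp hmem with ⟨p, hp, hpe⟩
    apply (PySem.Set.contains_iff _ _).mpr
    unfold scanFound
    rw [mem_scan_fold]
    refine Or.inr ⟨j, List.mem_range.mpr hjlt, p, hp, ?_, hpe⟩
    apply List.isPrefixOf_iff_prefix.mpr
    rw [hpe]
    exact hjp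

-- ===== VERDICT (by name: the statement is the Claim_ definition above) =====
theorem infer_domain_from_name_py_spec : Claim_equal_infer_domain_from_name_py := by
  intro name _
  unfold Spec_infer_domain_from_name_py infer_domain_from_name_py infer_domain_from_name_py_alt
  set lowered := PySem.Str.lower (name.getD "") with hl
  have e1 := contains_scanFound lowered "hiring" (by decide) (by decide)
  have e2 := contains_scanFound lowered "loan" (by decide) (by decide)
  have e3 := contains_scanFound lowered "social" (by decide) (by decide)
  have e4 := contains_scanFound lowered "hire" (by decide) (by decide)
  have e5 := contains_scanFound lowered "credit" (by decide) (by decide)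
  have e6 := contains_scanFound lowered "recommend" (by decide) (by decide)
  simp only [kwTable, List.find?, e1, e2, e3, e4, e5, e6]
  cases h1 : PySem.Str.isIn "hiring" lowered <;>
  cases h2 : PySem.Str.isIn "loan" lowered <;>
  cases h3 : PySem.Str.isIn "social" lowered <;>
  cases h4 : PySem.Str.isIn "hire" lowered <;>
  cases h5 : PySem.Str.isIn "credit" lowered <;>
  cases h6 : PySem.Str.isIn "recommend" lowered <;>
  simp
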